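-- pv_equiv track=rewrite | github.com/yuxi-liu-wired/Project-Euler | python/solution_4.py | descending_stream
-- ===== SOURCE A (Python) =====
-- def descending_stream(min_n, max_n):
--     for sum in range(max_n * 2, min_n * 2 - 1, -1):
--         for diff in range(0, sum // 2):
--             x = (sum + diff) // 2
--             y = (sum - diff) // 2
--             if x > max_n or y < min_n:
--                 continue
--             yield (x, y)
-- ===== SOURCE B (Python) =====
-- def descending_stream(min_n, max_n):
--     # For each sum the stream is a monotone zigzag walk: x only ever grows and
--     # y only ever shrinks, so instead of recomputing (sum+diff)//2 and testing
--     # a filter per diff, B walks the pair incrementally and stops at the first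
--     # step that leaves the window (the filter is absorbing along the walk).
--     for s in range(max_n * 2, min_n * 2 - 1, -1):
--         x = y = s // 2
--         bump_x = s % 2 == 1
--         for _ in range(s // 2):
--             if x > max_n or y < min_n:
--                 break
--             yield (x, y)
--             if bump_x:
--                 x += 1
--             else:
--                 y -= 1
--             bump_x = not bump_x
-- ===== Notes on version B (the rewrite author's own statement) =====
-- stated objective: alternative
-- what changed: A recomputes x=(sum+diff)//2, y=(sum-diff)//2 for every diff in 0..sum//2-1 and filters each pair; B maintains the pair as incremental state, walking it in a zigzag (x+=1 / y-=1 alternately, no divisions per step) and breaking at the first pair outside the window, which is sound because x only grows and y only shrinks so the filter is absorbing.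
import Mathlib
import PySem

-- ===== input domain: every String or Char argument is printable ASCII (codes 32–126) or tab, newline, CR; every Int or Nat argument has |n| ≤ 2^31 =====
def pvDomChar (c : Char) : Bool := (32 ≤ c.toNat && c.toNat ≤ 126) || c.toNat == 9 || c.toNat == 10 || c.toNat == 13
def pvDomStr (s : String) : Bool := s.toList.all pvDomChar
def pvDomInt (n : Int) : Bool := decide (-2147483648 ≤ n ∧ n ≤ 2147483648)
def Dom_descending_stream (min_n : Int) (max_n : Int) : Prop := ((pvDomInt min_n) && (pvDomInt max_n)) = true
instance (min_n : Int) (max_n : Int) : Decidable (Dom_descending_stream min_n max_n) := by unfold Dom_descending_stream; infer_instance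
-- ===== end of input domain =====

-- B replaces A's per-diff floordiv arithmetic and pass/fail filter by an incremental
-- zigzag walk of the pair (x grows, y shrinks) with an absorbing early exit (objective: alternative).

-- ===== PORT A =====
def descending_stream (min_n : Int) (max_n : Int) : List (Int × Int) :=
  (PySem.List.pyRange (max_n * 2) (min_n * 2 - 1) (-1)).foldl (fun acc s =>
    (PySem.List.pyRange 0 (PySem.Int.floordiv s 2) 1).foldl (fun acc2 d =>
      let x := PySem.Int.floordiv (s + d) 2
      let y := PySem.Int.floordiv (s - d) 2
      if x > max_n ∨ y < min_n then acc2 else acc2 ++ [(x, y)]) acc) []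

-- ===== PORT B =====
-- the inner 'for _ in range(s // 2): … break …' loop of Source B, as fuel recursion
def zig (min_n max_n : Int) : Nat → Int → Int → Bool → List (Int × Int) → List (Int × Int)
  | 0, _, _, _, acc => acc
  | n + 1, x, y, b, acc =>
    if x > max_n ∨ y < min_n then acc
    else zig min_n max_n n (if b then x + 1 else x) (if b then y else y - 1) (!b)
      (acc ++ [(x, y)])

def descending_stream_alt (min_n : Int) (max_n : Int) : List (Int × Int) :=
  (PySem.List.pyRange (max_n * 2) (min_n * 2 - 1) (-1)).foldl (fun acc s =>
    let k := PySem.Int.floordiv s 2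
    zig min_n max_n k.toNat k k (decide (PySem.Int.mod s 2 = 1)) acc) []

-- ===== PRECONDITION & SPEC =====
def Spec_descending_stream (min_n : Int) (max_n : Int) (out : List (Int × Int)) : Prop := out = descending_stream_alt min_n max_n
instance (min_n : Int) (max_n : Int) (out : List (Int × Int)) : Decidable (Spec_descending_stream min_n max_n out) := by unfold Spec_descending_stream; infer_instance

-- ===== CLAIM =====
def Claim_equal_descending_stream : Prop := ∀ (min_n : Int) (max_n : Int), Dom_descending_stream min_n max_n → Spec_descending_stream min_n max_n (descending_stream min_n max_n)

-- ===== LEMMAS AND PROOFS =====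

theorem if_flip {β : Type} (P : Prop) [Decidable P] (a b : β) :
    (if P then a else b) = (if (decide ¬P : Bool) then b else a) := by
  by_cases h : P <;> simp [h]

-- A's inner filtered scan over all diffs equals the map over the valid prefix of diffs.
theorem inner_eq (min_n max_n s : Int) (acc : List (Int × Int)) :
    (PySem.List.pyRange 0 (PySem.Int.floordiv s 2) 1).foldl (fun acc2 d =>
      let x := PySem.Int.floordiv (s + d) 2
      let y := PySem.Int.floordiv (s - d) 2
      if x > max_n ∨ y < min_n then acc2 else acc2 ++ [(x, y)]) acc
    = acc ++ (PySem.List.pyRange 0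
        (min (min (PySem.Int.floordiv s 2 - 1) (2 * max_n + 1 - s)) (s - 2 * min_n) + 1) 1).map
        (fun d => (PySem.Int.floordiv (s + d) 2, PySem.Int.floordiv (s - d) 2)) := by
  generalize PySem.Int.floordiv s 2 = n
  refine (PySem.List.foldl_congr_mem _ _
      (fun acc2 d =>
        if (decide (¬ ((PySem.Int.floordiv (s + d) 2 : Int) > max_n ∨ PySem.Int.floordiv (s - d) 2 < min_n)) : Bool)
        then acc2 ++ [(PySem.Int.floordiv (s + d) 2, PySem.Int.floordiv (s - d) 2)] else acc2) acc
      (fun acc2 d _ => if_flip _ _ _)).trans ?_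
  rw [PySem.List.foldl_append_if]
  congr 1
  have h2 : (0:Int) < 2 := by norm_num
  have hcond : ∀ d : Int,
      ((¬ ((PySem.Int.floordiv (s + d) 2 : Int) > max_n ∨ PySem.Int.floordiv (s - d) 2 < min_n)) ↔
        d ≤ min (2 * max_n + 1 - s) (s - 2 * min_n)) := by
    intro d
    rw [gt_iff_lt, ← Int.add_one_le_iff, PySem.Int.le_floordiv_iff_mul_le h2,
        PySem.Int.floordiv_lt_iff_lt_mul h2]
    omega
  rw [show min (min (n - 1) (2 * max_n + 1 - s)) (s - 2 * min_n) + 1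
        = min n (min (2 * max_n + 1 - s) (s - 2 * min_n) + 1) from by omega]
  by_cases hn0 : n ≤ 0
  · rw [PySem.List.pyRange_one_eq_nil hn0, PySem.List.pyRange_one_eq_nil (by omega)]
    simp
  · rw [PySem.List.pyRange_one_append 0
        (max 0 (min n (min (2 * max_n + 1 - s) (s - 2 * min_n) + 1))) n (by omega) (by omega),
      List.filter_append]
    have hself : (PySem.List.pyRange 0
          (max 0 (min n (min (2 * max_n + 1 - s) (s - 2 * min_n) + 1))) 1).filter
        (fun d => (decide (¬ ((PySem.Int.floordiv (s + d) 2 : Int) > max_n ∨ PySem.Int.floordiv (s - d) 2 < min_n)) : Bool))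
        = PySem.List.pyRange 0 (max 0 (min n (min (2 * max_n + 1 - s) (s - 2 * min_n) + 1))) 1 := by
      apply List.filter_eq_self.mpr
      intro d hd
      have hdm := PySem.List.mem_pyRange_one.mp hd
      simpa using (hcond d).mpr (by omega)
    have hnil : (PySem.List.pyRange
          (max 0 (min n (min (2 * max_n + 1 - s) (s - 2 * min_n) + 1))) n 1).filter
        (fun d => (decide (¬ ((PySem.Int.floordiv (s + d) 2 : Int) > max_n ∨ PySem.Int.floordiv (s - d) 2 < min_n)) : Bool))
        = [] := by
      apply List.filter_eq_nil_iff.mpr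
      intro d hd
      have hdm := PySem.List.mem_pyRange_one.mp hd
      have h1 : min n (min (2 * max_n + 1 - s) (s - 2 * min_n) + 1) ≤ d :=
        le_trans (le_max_right _ _) hdm.1
      exact fun hp => absurd ((hcond d).mp (by simpa using hp))
        (by rcases min_choice n (min (2 * max_n + 1 - s) (s - 2 * min_n) + 1) with h | h <;> omega)
    rw [hself, hnil, List.append_nil]
    by_cases hneg : min n (min (2 * max_n + 1 - s) (s - 2 * min_n) + 1) ≤ 0
    · rw [PySem.List.pyRange_one_eq_nil hneg, PySem.List.pyRange_one_eq_nil (by omega)]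
    · rw [max_eq_right (le_of_lt (not_le.mp hneg))]

-- B's zigzag walk started at diff d computes the same map over the remaining valid diffs.
theorem zig_spec (min_n max_n s : Int) (n : Nat) (d : Int) (acc : List (Int × Int))
    (hd : 0 ≤ d) (hn : (n : Int) = max (PySem.Int.floordiv s 2 - d) 0) :
    zig min_n max_n n (PySem.Int.floordiv (s + d) 2) (PySem.Int.floordiv (s - d) 2)
      (decide (PySem.Int.mod (s + d) 2 = 1)) acc
    = acc ++ (PySem.List.pyRange d
        (min (min (PySem.Int.floordiv s 2 - 1) (2 * max_n + 1 - s)) (s - 2 * min_n) + 1) 1).map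
        (fun d => (PySem.Int.floordiv (s + d) 2, PySem.Int.floordiv (s - d) 2)) := by
  induction n generalizing d acc with
  | zero =>
    rw [PySem.List.pyRange_one_eq_nil (by omega), zig]
    simp
  | succ m ih =>
    have h2 : (0:Int) < 2 := by norm_num
    have hq := PySem.Int.floordiv_mul_add_mod (s + d) 2
    have hq' := PySem.Int.floordiv_mul_add_mod (s - d) 2
    have hr0 := PySem.Int.mod_nonneg (s + d) h2
    have hr1 := PySem.Int.mod_lt (s + d) h2
    have hr0' := PySem.Int.mod_nonneg (s - d) h2
    have hr1' := PySem.Int.mod_lt (s - d) h2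
    have hk := PySem.Int.floordiv_mul_add_mod s 2
    have hks0 := PySem.Int.mod_nonneg s h2
    have hks1 := PySem.Int.mod_lt s h2
    rw [zig]
    by_cases hstop : (PySem.Int.floordiv (s + d) 2 : Int) > max_n ∨ PySem.Int.floordiv (s - d) 2 < min_n
    · rw [if_pos hstop, PySem.List.pyRange_one_eq_nil (by omega)]
      simp
    · rw [if_neg hstop]
      push Not at hstop
      have hd1 : d ≤ min (2 * max_n + 1 - s) (s - 2 * min_n) := by omega
      have hdk : d ≤ PySem.Int.floordiv s 2 - 1 := by omega
      rw [PySem.List.pyRange_one_cons (by omega), List.map_cons,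
        show acc ++ ((PySem.Int.floordiv (s + d) 2, PySem.Int.floordiv (s - d) 2) ::
            (PySem.List.pyRange (d + 1)
              (min (min (PySem.Int.floordiv s 2 - 1) (2 * max_n + 1 - s)) (s - 2 * min_n) + 1) 1).map
              (fun d => (PySem.Int.floordiv (s + d) 2, PySem.Int.floordiv (s - d) 2)))
          = (acc ++ [(PySem.Int.floordiv (s + d) 2, PySem.Int.floordiv (s - d) 2)]) ++
            (PySem.List.pyRange (d + 1)
              (min (min (PySem.Int.floordiv s 2 - 1) (2 * max_n + 1 - s)) (s - 2 * min_n) + 1) 1).map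
              (fun d => (PySem.Int.floordiv (s + d) 2, PySem.Int.floordiv (s - d) 2)) from by simp]
      rw [← ih (d + 1) _ (by omega) (by omega)]
      have hqnext := PySem.Int.floordiv_mul_add_mod (s + (d + 1)) 2
      have hqn0 := PySem.Int.mod_nonneg (s + (d + 1)) h2
      have hqn1 := PySem.Int.mod_lt (s + (d + 1)) h2
      have hq'next := PySem.Int.floordiv_mul_add_mod (s - (d + 1)) 2
      have hq'n0 := PySem.Int.mod_nonneg (s - (d + 1)) h2
      have hq'n1 := PySem.Int.mod_lt (s - (d + 1)) h2
      by_cases hr : PySem.Int.mod (s + d) 2 = 1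
      · have hx : PySem.Int.floordiv (s + (d + 1)) 2 = PySem.Int.floordiv (s + d) 2 + 1 := by omega
        have hy : PySem.Int.floordiv (s - (d + 1)) 2 = PySem.Int.floordiv (s - d) 2 := by omega
        have hb2 : (decide (PySem.Int.mod (s + d) 2 = 1)) = true := decide_eq_true hr
        have hb3 : (decide (PySem.Int.mod (s + (d + 1)) 2 = 1)) = false := decide_eq_false (by omega)
        rw [hb2, hb3, hx, hy]
        simp
      · have hx : PySem.Int.floordiv (s + (d + 1)) 2 = PySem.Int.floordiv (s + d) 2 := by omega
        have hy : PySem.Int.floordiv (s - (d + 1)) 2 = PySem.Int.floordiv (s - d) 2 - 1 := by omega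
        have hb2 : (decide (PySem.Int.mod (s + d) 2 = 1)) = false := decide_eq_false hr
        have hb3 : (decide (PySem.Int.mod (s + (d + 1)) 2 = 1)) = true := decide_eq_true (by omega)
        rw [hb2, hb3, hx, hy]
        simp

-- ===== VERDICT =====
theorem descending_stream_spec : Claim_equal_descending_stream := by
  intro min_n max_n _
  unfold Spec_descending_stream descending_stream descending_stream_alt
  refine PySem.List.foldl_congr_mem _ _ _ _ (fun acc s _ => ?_)
  rw [inner_eq min_n max_n s acc]
  have := zig_spec min_n max_n s (PySem.Int.floordiv s 2).toNat 0 acc le_rfl (by omega)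
  simpa using this.symm
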